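-- pv_equiv track=rewrite | github.com/khyvero/robot-agentic-rag | core/agents/plan_generator.py | _build_error_hints
-- ===== SOURCE A (Python) =====
-- def _build_error_hints(errors: list) -> str:
--     # build targeted error hints for llm to fix plan on retry
--     hints = []
--
--     for error in errors:
--         # wait action missing duration
--         if "'wait' missing 'duration_seconds'" in error:
--             hints.append(
--                 "- The 'wait' action MUST include 'duration_seconds' parameter.\n"
--                 "  Correct format: {\"type\": \"wait\", \"duration_seconds\": 3}"
--             )
--
--         # pour action missing target container
--         elif "'pour' missing 'target_container_name'" in error:
--             hints.append(
--                 "- The 'pour' action MUST include 'target_container_name' parameter.\n"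
--                 "  Correct format: {\"type\": \"pour\", \"target_container_name\": \"beaker_water\"}"
--             )
--
--         # pick action missing target object
--         elif "'pick' missing 'target_obj_name'" in error:
--             hints.append(
--                 "- The 'pick' action MUST include 'target_obj_name' parameter.\n"
--                 "  Correct format: {\"type\": \"pick\", \"target_obj_name\": \"test_tube_blood\"}"
--             )
--
--         # place action missing destination
--         elif "'place' missing 'destination_obj_name' or 'destination_coords'" in error:
--             hints.append(
--                 "- The 'place' action MUST include either 'destination_obj_name' OR 'destination_coords'.\n"
--                 "  Correct format: {\"type\": \"place\", \"destination_obj_name\": \"storage_rack\"} OR\n"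
--                 "  {\"type\": \"place\", \"destination_coords\": {\"x\": 200, \"y\": 300}}"
--             )
--
--         # shake/swirl action missing target
--         elif "'shake' missing 'target_obj_name'" in error or "'swirl' missing 'target_obj_name'" in error:
--             action = "shake" if "shake" in error else "swirl"
--             hints.append(
--                 f"- The '{action}' action MUST include 'target_obj_name' parameter.\n"
--                 f"  Correct format: {{\"type\": \"{action}\", \"target_obj_name\": \"test_tube_reagent\"}}"
--             )
--
--         # place_in_area missing area_bounds
--         elif "'place_in_area' missing 'area_bounds'" in error:
--             hints.append(
--                 "- The 'place_in_area' action MUST include 'area_bounds' parameter.\n"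
--                 "  Correct format: {\"type\": \"place_in_area\", \"area_bounds\": {\"x_min\": 100, \"x_max\": 300, \"y_min\": 200, \"y_max\": 400}}"
--             )
--
--         # invalid simulation speed
--         elif "Invalid simulation_speed" in error:
--             hints.append(
--                 "- The 'simulation_speed' in settings MUST be an integer between 1 and 5.\n"
--                 "  Correct format: \"settings\": {\"simulation_speed\": 3}"
--             )
--
--     if not hints:
--         return ""
--
--     # deduplicate hints
--     unique_hints = []
--     seen = set()
--     for hint in hints:
--         hint_type = hint.split('\n')[0]
--         if hint_type not in seen:
--             unique_hints.append(hint)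
--             seen.add(hint_type)
--
--     return "\n".join(unique_hints)
-- ===== SOURCE B (Python) =====
-- def _build_error_hints(errors: list) -> str:
--     # Invert the loops: instead of scanning errors and deduplicating hints, search,
--     # for each of the 8 possible hint kinds, the FIRST error that triggers it, then
--     # emit the found hints ordered by that first position. No seen-set, no dedup pass.
--     M_WAIT = "'wait' missing 'duration_seconds'"
--     M_POUR = "'pour' missing 'target_container_name'"
--     M_PICK = "'pick' missing 'target_obj_name'"
--     M_PLACE = "'place' missing 'destination_obj_name' or 'destination_coords'"
--     M_SHAKE = "'shake' missing 'target_obj_name'"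
--     M_SWIRL = "'swirl' missing 'target_obj_name'"
--     M_AREA = "'place_in_area' missing 'area_bounds'"
--     M_SPEED = "Invalid simulation_speed"
--
--     def kind_of(e):
--         # priority order of the validator's messages
--         if M_WAIT in e: return "wait"
--         if M_POUR in e: return "pour"
--         if M_PICK in e: return "pick"
--         if M_PLACE in e: return "place"
--         if M_SHAKE in e or M_SWIRL in e:
--             return "shake" if "shake" in e else "swirl"
--         if M_AREA in e: return "place_in_area"
--         if M_SPEED in e: return "simulation_speed"
--         return None
--
--     HINTS = {
--         "wait": "- The 'wait' action MUST include 'duration_seconds' parameter.\n"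
--                 "  Correct format: {\"type\": \"wait\", \"duration_seconds\": 3}",
--         "pour": "- The 'pour' action MUST include 'target_container_name' parameter.\n"
--                 "  Correct format: {\"type\": \"pour\", \"target_container_name\": \"beaker_water\"}",
--         "pick": "- The 'pick' action MUST include 'target_obj_name' parameter.\n"
--                 "  Correct format: {\"type\": \"pick\", \"target_obj_name\": \"test_tube_blood\"}",
--         "place": "- The 'place' action MUST include either 'destination_obj_name' OR 'destination_coords'.\n"
--                  "  Correct format: {\"type\": \"place\", \"destination_obj_name\": \"storage_rack\"} OR\n"
--                  "  {\"type\": \"place\", \"destination_coords\": {\"x\": 200, \"y\": 300}}",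
--         "shake": "- The 'shake' action MUST include 'target_obj_name' parameter.\n"
--                  "  Correct format: {\"type\": \"shake\", \"target_obj_name\": \"test_tube_reagent\"}",
--         "swirl": "- The 'swirl' action MUST include 'target_obj_name' parameter.\n"
--                  "  Correct format: {\"type\": \"swirl\", \"target_obj_name\": \"test_tube_reagent\"}",
--         "place_in_area": "- The 'place_in_area' action MUST include 'area_bounds' parameter.\n"
--                          "  Correct format: {\"type\": \"place_in_area\", \"area_bounds\": {\"x_min\": 100, \"x_max\": 300, \"y_min\": 200, \"y_max\": 400}}",
--         "simulation_speed": "- The 'simulation_speed' in settings MUST be an integer between 1 and 5.\n"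
--                             "  Correct format: \"settings\": {\"simulation_speed\": 3}",
--     }
--
--     found = []
--     for kind, hint in HINTS.items():
--         pos = next((i for i, e in enumerate(errors) if kind_of(e) == kind), None)
--         if pos is not None:
--             found.append((pos, hint))
--     found.sort(key=lambda t: t[0])
--     return "\n".join(hint for _, hint in found)
-- ===== Notes on version B (the rewrite author's own statement) =====
-- stated objective: alternative
-- what changed: Inverted the loop structure: instead of A's single forward scan appending hints followed by a seen-set dedup pass, B searches, for each of the 8 possible hint kinds, the first error position that triggers that kind, then sorts the found (position, hint) pairs by position and joins them - no hints list, no seen set, no dedup.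
import Mathlib
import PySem

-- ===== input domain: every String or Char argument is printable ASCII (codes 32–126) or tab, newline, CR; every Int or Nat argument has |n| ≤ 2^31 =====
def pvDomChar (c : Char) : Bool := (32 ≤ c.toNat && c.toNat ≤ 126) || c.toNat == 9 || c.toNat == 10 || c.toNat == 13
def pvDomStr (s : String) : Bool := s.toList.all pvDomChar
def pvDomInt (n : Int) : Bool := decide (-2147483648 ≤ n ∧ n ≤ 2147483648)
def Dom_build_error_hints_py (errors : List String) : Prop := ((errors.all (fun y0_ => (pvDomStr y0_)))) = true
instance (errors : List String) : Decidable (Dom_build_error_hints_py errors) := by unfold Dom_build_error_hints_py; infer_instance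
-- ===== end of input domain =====

-- B inverts the loops: instead of A's forward scan appending hints followed by a seen-set dedup
-- pass, B searches, for each of the 8 possible hint kinds, the first error position triggering
-- that kind, then sorts the found (position, hint) pairs by position (objective: alternative).

-- ===== PORT A =====
-- the hint string literals
def hintWait : String := "- The 'wait' action MUST include 'duration_seconds' parameter.\n  Correct format: {\"type\": \"wait\", \"duration_seconds\": 3}"
def hintPour : String := "- The 'pour' action MUST include 'target_container_name' parameter.\n  Correct format: {\"type\": \"pour\", \"target_container_name\": \"beaker_water\"}"
def hintPick : String := "- The 'pick' action MUST include 'target_obj_name' parameter.\n  Correct format: {\"type\": \"pick\", \"target_obj_name\": \"test_tube_blood\"}"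
def hintPlace : String := "- The 'place' action MUST include either 'destination_obj_name' OR 'destination_coords'.\n  Correct format: {\"type\": \"place\", \"destination_obj_name\": \"storage_rack\"} OR\n  {\"type\": \"place\", \"destination_coords\": {\"x\": 200, \"y\": 300}}"
-- the f-string of A's shake/swirl branch
def hintShakeSwirl (error : String) : String :=
  let action := if PySem.Str.isIn "shake" error then "shake" else "swirl"
  "- The '" ++ action ++ "' action MUST include 'target_obj_name' parameter.\n  Correct format: {\"type\": \"" ++ action ++ "\", \"target_obj_name\": \"test_tube_reagent\"}"
def hintArea : String := "- The 'place_in_area' action MUST include 'area_bounds' parameter.\n  Correct format: {\"type\": \"place_in_area\", \"area_bounds\": {\"x_min\": 100, \"x_max\": 300, \"y_min\": 200, \"y_max\": 400}}"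
def hintSpeed : String := "- The 'simulation_speed' in settings MUST be an integer between 1 and 5.\n  Correct format: \"settings\": {\"simulation_speed\": 3}"

-- the body of A's dedup loop (hint.split('\n')[0]; split never returns [], so [0] via pyGetD is exact)
def dedupStepA (acc : List String × PySem.Set String) (hint : String) : List String × PySem.Set String :=
  let hint_type := PySem.List.pyGetD ((PySem.Str.split? hint "\n").getD []) 0 ""
  if PySem.Set.contains acc.2 hint_type then acc
  else (acc.1 ++ [hint], PySem.Set.add acc.2 hint_type)

def build_error_hints_py (errors : List String) : String :=
  let hints : List String := errors.foldl (fun hints error =>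
    if PySem.Str.isIn "'wait' missing 'duration_seconds'" error then hints ++ [hintWait]
    else if PySem.Str.isIn "'pour' missing 'target_container_name'" error then hints ++ [hintPour]
    else if PySem.Str.isIn "'pick' missing 'target_obj_name'" error then hints ++ [hintPick]
    else if PySem.Str.isIn "'place' missing 'destination_obj_name' or 'destination_coords'" error then hints ++ [hintPlace]
    else if PySem.Str.isIn "'shake' missing 'target_obj_name'" error || PySem.Str.isIn "'swirl' missing 'target_obj_name'" error then hints ++ [hintShakeSwirl error]
    else if PySem.Str.isIn "'place_in_area' missing 'area_bounds'" error then hints ++ [hintArea]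
    else if PySem.Str.isIn "Invalid simulation_speed" error then hints ++ [hintSpeed]
    else hints) []
  if hints = [] then ""
  else
    let p := hints.foldl dedupStepA ([], PySem.Set.empty)
    PySem.Str.join "\n" p.1

-- ===== PORT B =====
-- Source B's kind_of: which validator message (by priority) an error carries
def kindOf (e : String) : Option String :=
  if PySem.Str.isIn "'wait' missing 'duration_seconds'" e then some "wait"
  else if PySem.Str.isIn "'pour' missing 'target_container_name'" e then some "pour"
  else if PySem.Str.isIn "'pick' missing 'target_obj_name'" e then some "pick"
  else if PySem.Str.isIn "'place' missing 'destination_obj_name' or 'destination_coords'" e then some "place"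
  else if PySem.Str.isIn "'shake' missing 'target_obj_name'" e || PySem.Str.isIn "'swirl' missing 'target_obj_name'" e then
    some (if PySem.Str.isIn "shake" e then "shake" else "swirl")
  else if PySem.Str.isIn "'place_in_area' missing 'area_bounds'" e then some "place_in_area"
  else if PySem.Str.isIn "Invalid simulation_speed" e then some "simulation_speed"
  else none

-- Source B's HINTS dict (association list, insertion order)
def hintsTable : List (String × String) :=
  [ ("wait", hintWait), ("pour", hintPour), ("pick", hintPick), ("place", hintPlace),
    ("shake", "- The 'shake' action MUST include 'target_obj_name' parameter.\n  Correct format: {\"type\": \"shake\", \"target_obj_name\": \"test_tube_reagent\"}"),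
    ("swirl", "- The 'swirl' action MUST include 'target_obj_name' parameter.\n  Correct format: {\"type\": \"swirl\", \"target_obj_name\": \"test_tube_reagent\"}"),
    ("place_in_area", hintArea), ("simulation_speed", hintSpeed) ]

-- next((i for i, e in enumerate(errors) if kind_of(e) == kind), None)
def findPos (kind : String) : List String → Int → Option Int
  | [], _ => none
  | e :: es, i => if kindOf e = some kind then some i else findPos kind es (i + 1)

def build_error_hints_py_alt (errors : List String) : String :=
  let found : List (Int × String) := hintsTable.foldl (fun acc kh =>
    match findPos kh.1 errors 0 with
    | none => acc
    | some p => acc ++ [(p, kh.2)]) []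
  let sortedFound := PySem.List.sorted found (fun t => t.1) false
  PySem.Str.join "\n" (sortedFound.map (fun t => t.2))

-- ===== PRECONDITION & SPEC =====
def Spec_build_error_hints_py (errors : List String) (out : String) : Prop := out = build_error_hints_py_alt errors
instance (errors : List String) (out : String) : Decidable (Spec_build_error_hints_py errors out) := by unfold Spec_build_error_hints_py; infer_instance

-- ===== CLAIM (what is proved, stated in full; the proofs are below) =====
def Claim_equal_build_error_hints_py : Prop := ∀ (errors : List String), Dom_build_error_hints_py errors → Spec_build_error_hints_py errors (build_error_hints_py errors)

-- ===== LEMMAS AND PROOFS =====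

-- proof-side helpers
def kindNames : List String := ["wait", "pour", "pick", "place", "shake", "swirl", "place_in_area", "simulation_speed"]

def hintFor (k : String) : String :=
  if k = "wait" then hintWait
  else if k = "pour" then hintPour
  else if k = "pick" then hintPick
  else if k = "place" then hintPlace
  else if k = "shake" then "- The 'shake' action MUST include 'target_obj_name' parameter.\n  Correct format: {\"type\": \"shake\", \"target_obj_name\": \"test_tube_reagent\"}"
  else if k = "swirl" then "- The 'swirl' action MUST include 'target_obj_name' parameter.\n  Correct format: {\"type\": \"swirl\", \"target_obj_name\": \"test_tube_reagent\"}"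
  else if k = "place_in_area" then hintArea
  else hintSpeed

def firstLine (h : String) : String := PySem.List.pyGetD ((PySem.Str.split? h "\n").getD []) 0 ""

-- indices (from i) of the classified errors, with their kinds
def occK : List String → Int → List (Int × String)
  | [], _ => []
  | e :: es, i =>
      match kindOf e with
      | none => occK es (i + 1)
      | some k => (i, k) :: occK es (i + 1)

-- functional form of A's dedup loop
def dedupK (S : PySem.Set String) : List String → List String
  | [] => []
  | h :: t => if PySem.Set.contains S (firstLine h) then dedupK S t
              else h :: dedupK (PySem.Set.add S (firstLine h)) t

-- dedup on (index, kind) pairs, keyed like A's (by the first line of the kind's hint)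
def dedupP (S : PySem.Set String) : List (Int × String) → List (Int × String)
  | [] => []
  | p :: t => if PySem.Set.contains S (firstLine (hintFor p.2)) then dedupP S t
              else p :: dedupP (PySem.Set.add S (firstLine (hintFor p.2))) t

set_option maxRecDepth 65536 in
set_option maxHeartbeats 4000000 in
lemma firstLine_hintFor_inj : ∀ k ∈ kindNames, ∀ k' ∈ kindNames,
    firstLine (hintFor k) = firstLine (hintFor k') → k = k' := by decide

-- A's classification equals kindOf followed by the hint table
set_option maxRecDepth 8192 in
set_option maxHeartbeats 2000000 in
lemma classify_eq (hints : List String) (e : String) :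
    (if PySem.Str.isIn "'wait' missing 'duration_seconds'" e then hints ++ [hintWait]
     else if PySem.Str.isIn "'pour' missing 'target_container_name'" e then hints ++ [hintPour]
     else if PySem.Str.isIn "'pick' missing 'target_obj_name'" e then hints ++ [hintPick]
     else if PySem.Str.isIn "'place' missing 'destination_obj_name' or 'destination_coords'" e then hints ++ [hintPlace]
     else if PySem.Str.isIn "'shake' missing 'target_obj_name'" e || PySem.Str.isIn "'swirl' missing 'target_obj_name'" e then hints ++ [hintShakeSwirl e]
     else if PySem.Str.isIn "'place_in_area' missing 'area_bounds'" e then hints ++ [hintArea]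
     else if PySem.Str.isIn "Invalid simulation_speed" e then hints ++ [hintSpeed]
     else hints) = hints ++ ((kindOf e).map hintFor).toList := by
  simp only [kindOf, hintShakeSwirl]
  generalize PySem.Str.isIn "'wait' missing 'duration_seconds'" e = b1
  generalize PySem.Str.isIn "'pour' missing 'target_container_name'" e = b2
  generalize PySem.Str.isIn "'pick' missing 'target_obj_name'" e = b3
  generalize PySem.Str.isIn "'place' missing 'destination_obj_name' or 'destination_coords'" e = b4
  generalize PySem.Str.isIn "'shake' missing 'target_obj_name'" e = b5
  generalize PySem.Str.isIn "'swirl' missing 'target_obj_name'" e = b6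
  generalize PySem.Str.isIn "shake" e = b0
  generalize PySem.Str.isIn "'place_in_area' missing 'area_bounds'" e = b7
  generalize PySem.Str.isIn "Invalid simulation_speed" e = b8
  cases b1 <;> cases b2 <;> cases b3 <;> cases b4 <;> cases b5 <;> cases b6 <;> cases b0 <;>
    cases b7 <;> cases b8 <;> simp [hintFor] <;> decide

lemma kindOf_mem_names (e : String) (k : String) (h : kindOf e = some k) : k ∈ kindNames := by
  unfold kindOf at h
  split_ifs at h <;> simp_all [kindNames] <;> split_ifs at h <;> simp_all

-- ----- A-side reduction -----

lemma foldlA_eq (errors : List String) (h : List String) :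
    errors.foldl (fun hints error =>
      if PySem.Str.isIn "'wait' missing 'duration_seconds'" error then hints ++ [hintWait]
      else if PySem.Str.isIn "'pour' missing 'target_container_name'" error then hints ++ [hintPour]
      else if PySem.Str.isIn "'pick' missing 'target_obj_name'" error then hints ++ [hintPick]
      else if PySem.Str.isIn "'place' missing 'destination_obj_name' or 'destination_coords'" error then hints ++ [hintPlace]
      else if PySem.Str.isIn "'shake' missing 'target_obj_name'" error || PySem.Str.isIn "'swirl' missing 'target_obj_name'" error then hints ++ [hintShakeSwirl error]
      else if PySem.Str.isIn "'place_in_area' missing 'area_bounds'" error then hints ++ [hintArea]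
      else if PySem.Str.isIn "Invalid simulation_speed" error then hints ++ [hintSpeed]
      else hints) h = h ++ (errors.filterMap kindOf).map hintFor := by
  induction errors generalizing h with
  | nil => simp
  | cons e es ih =>
      rw [List.foldl_cons, List.filterMap_cons]
      show List.foldl _ (if _ then h ++ [hintWait] else _) es = _
      rw [classify_eq h e, ih]
      cases kindOf e <;> simp

lemma foldl_dedupA (l : List String) (u : List String) (S : PySem.Set String) :
    (l.foldl dedupStepA (u, S)).1 = u ++ dedupK S l := by
  induction l generalizing u S with
  | nil => simp [dedupK]
  | cons h t ih =>
      rw [List.foldl_cons]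
      show (List.foldl dedupStepA (dedupStepA (u, S) h) t).1 = _
      have hstep : dedupStepA (u, S) h =
          if PySem.Set.contains S (firstLine h) then (u, S)
          else (u ++ [h], PySem.Set.add S (firstLine h)) := rfl
      rw [hstep]
      unfold dedupK
      cases hc : PySem.Set.contains S (firstLine h)
      · rw [if_neg (by simp [hc]), if_neg (by simp [hc]), ih]
        simp
      · rw [if_pos (by simp [hc]), if_pos (by simp [hc]), ih]

lemma dedupK_map (l : List (Int × String)) (S : PySem.Set String) :
    dedupK S (l.map (fun p => hintFor p.2)) = (dedupP S l).map (fun p => hintFor p.2) := by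
  induction l generalizing S with
  | nil => simp [dedupK, dedupP]
  | cons p t ih =>
      simp only [List.map_cons]
      unfold dedupK dedupP
      by_cases hc : firstLine (hintFor p.2) ∈ S
      · simp [hc, ih]
      · simp [hc, ih]

lemma occK_snd (es : List String) (i : Int) :
    (occK es i).map (fun p => p.2) = es.filterMap kindOf := by
  induction es generalizing i with
  | nil => simp [occK]
  | cons e t ih =>
      unfold occK
      rw [List.filterMap_cons]
      cases kindOf e <;> simp [ih]

lemma A_eq (errors : List String) :
    build_error_hints_py errors =
      PySem.Str.join "\n" ((dedupP PySem.Set.empty (occK errors 0)).map (fun p => hintFor p.2)) := by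
  unfold build_error_hints_py
  rw [foldlA_eq]
  simp only [List.nil_append]
  rw [← occK_snd errors 0, List.map_map]
  have hfun : (hintFor ∘ fun (p : Int × String) => p.2) = fun p => hintFor p.2 := rfl
  rw [hfun]
  by_cases h : (occK errors 0).map (fun p => hintFor p.2) = []
  · rw [if_pos h]
    have hocc : occK errors 0 = [] := List.map_eq_nil_iff.mp h
    rw [hocc]
    rfl
  · rw [if_neg h, foldl_dedupA, dedupK_map]
    simp

-- ----- B-side reduction -----

lemma foldl_match_filterMap {α β : Type} (l : List α) (g : α → Option Int) (h : α → Int → β)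
    (acc : List β) :
    l.foldl (fun acc x => match g x with | none => acc | some p => acc ++ [h x p]) acc
      = acc ++ l.filterMap (fun x => (g x).map (h x)) := by
  induction l generalizing acc with
  | nil => simp
  | cons x t ih =>
      rw [List.foldl_cons, List.filterMap_cons]
      cases g x <;> simp [ih]

lemma findPos_eq (k : String) (es : List String) (i : Int) :
    findPos k es i = ((occK es i).find? (fun q => q.2 == k)).map (fun q => q.1) := by
  induction es generalizing i with
  | nil => simp [findPos, occK]
  | cons e t ih =>
      unfold findPos occK
      cases hk : kindOf e with
      | none => simp [hk, ih]
      | some k' =>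
          by_cases he : k' = k
          · subst he; simp [hk, List.find?_cons]
          · have : ¬ (kindOf e = some k) := by simp [hk, he]
            simp [this, List.find?_cons, he, ih]

lemma findPos_some_iff (k : String) (errors : List String) (j : Int) :
    findPos k errors 0 = some j ↔ (occK errors 0).find? (fun q => q.2 == k) = some (j, k) := by
  rw [findPos_eq]
  constructor
  · intro h
    cases hf : (occK errors 0).find? (fun q => q.2 == k) with
    | none => simp [hf] at h
    | some q =>
        have hp := List.find?_some hf
        simp only [beq_iff_eq] at hp
        simp only [hf, Option.map_some] at h
        obtain ⟨q1, q2⟩ := q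
        simp_all
  · intro h; simp [h]

-- ----- dedupP characterization -----

lemma dedupP_cons_of_mem (S : PySem.Set String) (p : Int × String) (t : List (Int × String))
    (hm : firstLine (hintFor p.2) ∈ S) : dedupP S (p :: t) = dedupP S t := by
  rw [dedupP]
  rw [if_pos ((PySem.Set.contains_iff _ _).2 hm)]

lemma dedupP_cons_of_not_mem (S : PySem.Set String) (p : Int × String) (t : List (Int × String))
    (hm : firstLine (hintFor p.2) ∉ S) :
    dedupP S (p :: t) = p :: dedupP (PySem.Set.add S (firstLine (hintFor p.2))) t := by
  rw [dedupP]
  rw [if_neg (fun h => hm ((PySem.Set.contains_iff _ _).1 h))]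


lemma dedupP_sublist (l : List (Int × String)) (S : PySem.Set String) :
    (dedupP S l).Sublist l := by
  induction l generalizing S with
  | nil => simp [dedupP]
  | cons p t ih =>
      by_cases hm : firstLine (hintFor p.2) ∈ S
      · rw [dedupP_cons_of_mem S p t hm]
        exact (ih S).cons p
      · rw [dedupP_cons_of_not_mem S p t hm]
        exact (ih _).cons₂ p

lemma dedupP_mem (l : List (Int × String)) (S : PySem.Set String) (j : Int) (k : String)
    (hnames : ∀ q ∈ l, q.2 ∈ kindNames) (hk : k ∈ kindNames) :
    ((j, k) ∈ dedupP S l ↔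
      (firstLine (hintFor k)) ∉ S ∧ l.find? (fun q => q.2 == k) = some (j, k)) := by
  induction l generalizing S with
  | nil => simp [dedupP]
  | cons p t ih =>
      obtain ⟨i, k'⟩ := p
      have hk' : k' ∈ kindNames := hnames (i, k') List.mem_cons_self
      have hnames' : ∀ q ∈ t, q.2 ∈ kindNames := fun q hq => hnames q (List.mem_cons_of_mem _ hq)
      by_cases hm : firstLine (hintFor k') ∈ S
      · rw [dedupP_cons_of_mem S (i, k') t hm, ih S hnames']
        by_cases he : k' = k
        · subst he
          constructor
          · rintro ⟨habs, -⟩; exact absurd hm habs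
          · rintro ⟨habs, -⟩; exact absurd hm habs
        · rw [List.find?_cons_of_neg (by simp [he])]
      · rw [dedupP_cons_of_not_mem S (i, k') t hm, List.mem_cons, ih _ hnames']
        by_cases he : k' = k
        · subst he
          rw [List.find?_cons_of_pos (by simp)]
          constructor
          · rintro (heq | ⟨hnot, -⟩)
            · refine ⟨hm, ?_⟩
              have hj : j = i := congrArg Prod.fst heq
              rw [hj]
            · exact absurd ((PySem.Set.mem_add _ _ _).2 (Or.inr rfl)) hnot
          · rintro ⟨-, hf⟩
            exact Or.inl (Option.some.inj hf).symm
        · rw [List.find?_cons_of_neg (by simp [he])]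
          have hne : (j, k) ≠ (i, k') := fun h => he ((Prod.ext_iff.1 h).2).symm
          have hkey : (firstLine (hintFor k) ∉ PySem.Set.add S (firstLine (hintFor k')))
              ↔ firstLine (hintFor k) ∉ S := by
            rw [PySem.Set.mem_add]
            have hneq : firstLine (hintFor k) ≠ firstLine (hintFor k') :=
              fun habs => he (firstLine_hintFor_inj k' hk' k hk habs.symm)
            simp [hneq]
          rw [hkey]
          simp [hne]

-- ----- occK order facts -----

lemma occK_fst_ge (es : List String) (i : Int) : ∀ p ∈ occK es i, i ≤ p.1 := by
  induction es generalizing i with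
  | nil => simp [occK]
  | cons e t ih =>
      unfold occK
      cases kindOf e with
      | none =>
          intro p hp
          have := ih (i + 1) p hp
          omega
      | some k =>
          intro p hp
          rcases List.mem_cons.1 hp with h | h
          · simp [h]
          · have := ih (i + 1) p h; omega

lemma occK_pairwise (es : List String) (i : Int) :
    (occK es i).Pairwise (fun p q => p.1 < q.1) := by
  induction es generalizing i with
  | nil => simp [occK]
  | cons e t ih =>
      unfold occK
      cases kindOf e with
      | none => exact ih (i + 1)
      | some k =>
          refine List.Pairwise.cons ?_ (ih (i + 1))
          intro q hq
          have := occK_fst_ge t (i + 1) q hq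
          simp only []
          omega

lemma occK_snd_names (es : List String) (i : Int) : ∀ q ∈ occK es i, q.2 ∈ kindNames := by
  induction es generalizing i with
  | nil => simp [occK]
  | cons e t ih =>
      unfold occK
      cases hk : kindOf e with
      | none => exact ih (i + 1)
      | some k =>
          intro q hq
          rcases List.mem_cons.1 hq with h | h
          · subst h; exact kindOf_mem_names e k hk
          · exact ih (i + 1) q h

-- ----- found and target -----

set_option maxRecDepth 8192 in
set_option maxHeartbeats 2000000 in
lemma hintsTable_eq : hintsTable = kindNames.map (fun k => (k, hintFor k)) := by decide

lemma map_snd_filterMap_sublist {γ : Type} (l : List (String × String)) (F : String → Option γ) :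
    ((l.filterMap (fun kh => (F kh.1).map (fun j => (j, kh.2)))).map (fun p => p.2)).Sublist
      (l.map (fun p => p.2)) := by
  induction l with
  | nil => simp
  | cons kh t ih =>
      rw [List.filterMap_cons]
      cases F kh.1 with
      | none => simp only [Option.map_none]; exact ih.cons _
      | some j => simp only [Option.map_some, List.map_cons]; exact ih.cons₂ _

set_option maxRecDepth 8192 in
set_option maxHeartbeats 2000000 in
lemma hintsTable_snd_nodup : (hintsTable.map (fun p => p.2)).Nodup := by decide

-- the value B's fold computes
lemma found_eq (errors : List String) :
    hintsTable.foldl (fun acc kh =>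
      match findPos kh.1 errors 0 with
      | none => acc
      | some p => acc ++ [(p, kh.2)]) ([] : List (Int × String))
    = hintsTable.filterMap (fun kh => (findPos kh.1 errors 0).map (fun j => (j, kh.2))) := by
  exact (foldl_match_filterMap hintsTable (fun kh => findPos kh.1 errors 0)
    (fun kh p => (p, kh.2)) []).trans (by simp)

-- ===== VERDICT (by name: the statement is the Claim_ definition above) =====
theorem build_error_hints_py_spec : Claim_equal_build_error_hints_py := by
  intro errors _
  show build_error_hints_py errors = build_error_hints_py_alt errors
  rw [A_eq]
  unfold build_error_hints_py_alt
  rw [found_eq]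
  set occ := occK errors 0 with hocc
  set found := hintsTable.filterMap (fun kh => (findPos kh.1 errors 0).map (fun j => (j, kh.2))) with hfound
  set target := (dedupP PySem.Set.empty occ).map (fun p => (p.1, hintFor p.2)) with htarget
  have hpw : target.Pairwise (fun p q => p.1 < q.1) := by
    rw [htarget]
    apply List.Pairwise.map
    · intro a b hab; exact hab
    · exact List.Pairwise.sublist (dedupP_sublist occ _) (occK_pairwise errors 0)
  have hsorted : PySem.List.sorted found (fun t => t.1) false = target := by
    refine PySem.List.sorted_eq_of_perm_of_pairwise_lt found target (fun t => t.1) ?_ hpw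
    -- target ~ found
    have hnd_found : found.Nodup := by
      rw [hfound]
      apply List.Nodup.of_map (fun p => p.2)
      exact (map_snd_filterMap_sublist hintsTable (fun k => findPos k errors 0)).nodup hintsTable_snd_nodup
    have hnd_target : target.Nodup := by
      refine hpw.imp ?_
      intro a b hlt heq
      rw [heq] at hlt
      omega
    rw [List.perm_ext_iff_of_nodup hnd_target hnd_found]
    intro p
    obtain ⟨j, h⟩ := p
    have hmem_target : (j, h) ∈ target ↔
        ∃ k ∈ kindNames, (occ.find? (fun q => q.2 == k)) = some (j, k) ∧ h = hintFor k := by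
      rw [htarget]
      simp only [List.mem_map]
      constructor
      · rintro ⟨⟨q1, q2⟩, hq, heq⟩
        have hq2 : q2 ∈ kindNames :=
          occK_snd_names errors 0 (q1, q2) ((dedupP_sublist occ _).subset hq)
        have hq' := (dedupP_mem occ PySem.Set.empty q1 q2 (occK_snd_names errors 0) hq2).1 hq
        have hje : q1 = j := congrArg Prod.fst heq
        have hke : hintFor q2 = h := congrArg Prod.snd heq
        exact ⟨q2, hq2, by rw [← hje]; exact hq'.2, hke.symm⟩
      · rintro ⟨k, hk, hf, rfl⟩
        refine ⟨(j, k), ?_, rfl⟩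
        exact (dedupP_mem occ PySem.Set.empty j k (occK_snd_names errors 0) hk).2
          ⟨by simp [PySem.Set.empty], hf⟩
    have hmem_found : (j, h) ∈ found ↔
        ∃ k ∈ kindNames, (occ.find? (fun q => q.2 == k)) = some (j, k) ∧ h = hintFor k := by
      rw [hfound, hintsTable_eq]
      simp only [List.filterMap_map, List.mem_filterMap, Function.comp_apply]
      constructor
      · rintro ⟨k, hk, hsome⟩
        rw [Option.map_eq_some_iff] at hsome
        obtain ⟨j', hj', heq⟩ := hsome
        have hj : j' = j := congrArg Prod.fst heq
        have hh : hintFor k = h := congrArg Prod.snd heq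
        refine ⟨k, hk, (findPos_some_iff k errors j).1 (hj ▸ hj'), hh.symm⟩
      · rintro ⟨k, hk, hf, rfl⟩
        refine ⟨k, hk, ?_⟩
        rw [(findPos_some_iff k errors j).2 hf]
        rfl
    rw [hmem_target, hmem_found]
  show PySem.Str.join "\n" (List.map (fun p => hintFor p.2) (dedupP PySem.Set.empty occ))
      = PySem.Str.join "\n" (List.map (fun t => t.2) (PySem.List.sorted found (fun t => t.1) false))
  rw [hsorted, htarget, List.map_map]
  rfl
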